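-- pv_equiv track=rewrite | github.com/gitsirsha/emc2polymatic-toolchain | scripts/autofix_from_log.py | count_numeric_lines
-- ===== SOURCE A (Python) =====
-- def find_section(lines, header):
--     for i, ln in enumerate(lines):
--         if ln.strip() == header:
--             j = i + 1
--             while j < len(lines) and lines[j].strip() == "":
--                 j += 1
--             k = j
--             while k < len(lines) and lines[k].strip() != "":
--                 k += 1
--             return (i, j, k)
--     return None
--
-- def count_numeric_lines(lines, header):
--     sec = find_section(lines, header)
--     if sec is None:
--         return 0
--     _, b0, b1 = sec
--     return sum(
--         1 for ln in lines[b0:b1]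
--         if ln.strip() and ln.strip().split()[0].isdigit()
--     )
-- ===== SOURCE B (Python) =====
-- def count_numeric_lines(lines, header):
--     # single pass, small state machine: 0 = searching header, 1 = skipping blanks, 2 = in section
--     state = 0
--     count = 0
--     for ln in lines:
--         s = ln.strip()
--         if state == 0:
--             if s == header:
--                 state = 1
--         elif s == "":
--             if state == 2:
--                 break
--         else:
--             if s.split()[0].isdigit():
--                 count += 1
--             state = 2
--     return count
-- ===== Notes on version B (the rewrite author's own statement) =====
-- stated objective: simpler
-- what changed: Replaced the find_section helper (index-based while loops computing section boundaries, then a slice and a generator sum) with one linear state-machine pass over the lines that counts numeric lines directly and breaks at the section's end.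
import Mathlib
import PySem

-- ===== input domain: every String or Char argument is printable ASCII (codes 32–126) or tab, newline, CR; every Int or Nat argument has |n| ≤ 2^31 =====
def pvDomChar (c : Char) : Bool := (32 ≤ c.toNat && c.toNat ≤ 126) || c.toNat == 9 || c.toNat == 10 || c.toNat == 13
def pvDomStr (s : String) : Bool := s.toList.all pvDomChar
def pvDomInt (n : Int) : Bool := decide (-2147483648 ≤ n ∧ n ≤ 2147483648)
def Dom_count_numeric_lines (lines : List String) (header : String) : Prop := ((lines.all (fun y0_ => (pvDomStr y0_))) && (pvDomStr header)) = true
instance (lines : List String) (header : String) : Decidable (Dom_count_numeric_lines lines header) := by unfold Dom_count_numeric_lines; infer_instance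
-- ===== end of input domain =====

-- B replaces index-hunting find_section + slice + sum with one state-machine pass; objective: simpler.

-- shared transliteration of the Python expression `s.split()[0].isdigit()` (both sources use it verbatim)
def pvFirstTokDigit (s : String) : Bool :=
  match PySem.List.pyGet? (PySem.Str.split₀ s) 0 with
  | some t => PySem.Str.strIsdigit t
  | none => false

-- ===== PORT A =====
-- `while j < len(lines) and lines[j].strip() == "": j += 1`
def pvWhileBlank (lines : List String) (j : Nat) : Nat :=
  if h : j < lines.length then
    if PySem.Str.strip lines[j] = "" then pvWhileBlank lines (j + 1) else j
  else j
termination_by lines.length - j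

-- `while k < len(lines) and lines[k].strip() != "": k += 1`
def pvWhileNonBlank (lines : List String) (k : Nat) : Nat :=
  if h : k < lines.length then
    if PySem.Str.strip lines[k] ≠ "" then pvWhileNonBlank lines (k + 1) else k
  else k
termination_by lines.length - k

-- find_section's `for i, ln in enumerate(lines)` loop, as recursion on the index i
def pvFindSec (lines : List String) (header : String) (i : Nat) : Option (Nat × Nat × Nat) :=
  if h : i < lines.length then
    if PySem.Str.strip lines[i] = header then
      let j := pvWhileBlank lines (i + 1)
      let k := pvWhileNonBlank lines j
      some (i, j, k)
    else pvFindSec lines header (i + 1)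
  else none
termination_by lines.length - i

def count_numeric_lines (lines : List String) (header : String) : Int :=
  match pvFindSec lines header 0 with
  | none => 0
  | some (_, b0, b1) =>
      (PySem.List.slice lines (some (b0 : Int)) (some (b1 : Int))).foldl
        (fun acc ln =>
          if PySem.Str.strip ln ≠ "" ∧ pvFirstTokDigit (PySem.Str.strip ln) then acc + 1 else acc)
        0

-- ===== PORT B =====
-- B's loop with its state variable (0 = searching, 1 = skipping blanks, 2 = in section); break = return count
def pvAltGo (header : String) : Nat → List String → Int
  | _, [] => 0
  | 0, ln :: rest =>
      if PySem.Str.strip ln = header then pvAltGo header 1 rest else pvAltGo header 0 rest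
  | 1, ln :: rest =>
      if PySem.Str.strip ln = "" then pvAltGo header 1 rest
      else (if pvFirstTokDigit (PySem.Str.strip ln) then 1 else 0) + pvAltGo header 2 rest
  | _ + 2, ln :: rest =>
      if PySem.Str.strip ln = "" then 0
      else (if pvFirstTokDigit (PySem.Str.strip ln) then 1 else 0) + pvAltGo header 2 rest

def count_numeric_lines_alt (lines : List String) (header : String) : Int :=
  pvAltGo header 0 lines

-- ===== PRECONDITION & SPEC =====
def Spec_count_numeric_lines (lines : List String) (header : String) (out : Int) : Prop := out = count_numeric_lines_alt lines header
instance (lines : List String) (header : String) (out : Int) : Decidable (Spec_count_numeric_lines lines header out) := by unfold Spec_count_numeric_lines; infer_instance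

-- ===== CLAIM (what is proved, stated in full; the proofs are below) =====
def Claim_equal_count_numeric_lines : Prop := ∀ (lines : List String) (header : String), Dom_count_numeric_lines lines header → Spec_count_numeric_lines lines header (count_numeric_lines lines header)

-- ===== LEMMAS AND PROOFS =====

def pvBlank (s : String) : Bool := PySem.Str.strip s == ""

-- A's result expression, generalized over the start index of the enumerate loop
def pvACnt (lines : List String) (header : String) (i : Nat) : Int :=
  match pvFindSec lines header i with
  | none => 0
  | some (_, b0, b1) =>
      (PySem.List.slice lines (some (b0 : Int)) (some (b1 : Int))).foldl
        (fun acc ln =>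
          if PySem.Str.strip ln ≠ "" ∧ pvFirstTokDigit (PySem.Str.strip ln) then acc + 1 else acc)
        0

theorem pvACnt_zero (lines : List String) (header : String) :
    count_numeric_lines lines header = pvACnt lines header 0 := rfl

theorem pvWhileBlank_eq (lines : List String) (j : Nat) :
    pvWhileBlank lines j = j + ((lines.drop j).takeWhile pvBlank).length := by
  fun_induction pvWhileBlank lines j with
  | case1 j h hb ih =>
      rw [List.drop_eq_getElem_cons h, List.takeWhile_cons]
      simp [pvBlank, hb] at *
      omega
  | case2 j h hb =>
      rw [List.drop_eq_getElem_cons h, List.takeWhile_cons]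
      simp [pvBlank, hb]
  | case3 j h =>
      have : lines.drop j = [] := List.drop_eq_nil_of_le (by omega)
      simp [this]

theorem pvWhileNonBlank_eq (lines : List String) (k : Nat) :
    pvWhileNonBlank lines k = k + ((lines.drop k).takeWhile (fun s => !pvBlank s)).length := by
  fun_induction pvWhileNonBlank lines k with
  | case1 k h hb ih =>
      rw [List.drop_eq_getElem_cons h, List.takeWhile_cons]
      simp [pvBlank, hb] at *
      omega
  | case2 k h hb =>
      rw [List.drop_eq_getElem_cons h, List.takeWhile_cons]
      simp [pvBlank, hb]
  | case3 k h =>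
      have : lines.drop k = [] := List.drop_eq_nil_of_le (by omega)
      simp [this]

theorem pvFoldCount (p : String → Prop) [DecidablePred p] :
    ∀ (l : List String) (a : Int),
      l.foldl (fun acc ln => if p ln then acc + 1 else acc) a
        = a + (l.countP (fun ln => decide (p ln)) : Int) := by
  intro l
  induction l with
  | nil => simp
  | cons x xs ih =>
      intro a
      by_cases hx : p x <;> simp [List.countP_cons, hx, ih] <;> push_cast <;> ring

theorem pvAltGo_two (header : String) (l : List String) :
    pvAltGo header 2 l
      = ((l.takeWhile (fun s => !pvBlank s)).countP
          (fun s => pvFirstTokDigit (PySem.Str.strip s)) : Int) := by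
  induction l with
  | nil => simp [pvAltGo]
  | cons x xs ih =>
      have hstep : pvAltGo header 2 (x :: xs)
          = if PySem.Str.strip x = "" then 0
            else (if pvFirstTokDigit (PySem.Str.strip x) then 1 else 0) + pvAltGo header 2 xs := rfl
      rw [hstep]
      by_cases hx : PySem.Str.strip x = ""
      · simp [hx, List.takeWhile_cons, pvBlank]
      · rw [if_neg hx, ih, List.takeWhile_cons]
        have : (pvBlank x = false) := by simp [pvBlank, hx]
        simp only [this, Bool.not_false, if_true, List.countP_cons]
        by_cases hd : pvFirstTokDigit (PySem.Str.strip x)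
        · simp [hd]; push_cast; ring
        · simp [hd]

theorem pvAltGo_one (header : String) (l : List String) :
    pvAltGo header 1 l = pvAltGo header 2 (l.dropWhile pvBlank) := by
  induction l with
  | nil => simp [pvAltGo]
  | cons x xs ih =>
      by_cases hx : PySem.Str.strip x = ""
      · simpa [pvAltGo, hx, List.dropWhile_cons, pvBlank] using ih
      · simp [pvAltGo, hx, List.dropWhile_cons, pvBlank]

theorem pv_drop_takeWhile (p : String → Bool) (l : List String) :
    l.drop (l.takeWhile p).length = l.dropWhile p := by
  induction l with
  | nil => simp
  | cons x xs ih =>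
      by_cases hx : p x <;> simp [List.takeWhile_cons, List.dropWhile_cons, hx, ih]

theorem pv_take_takeWhile (p : String → Bool) (l : List String) :
    l.take (l.takeWhile p).length = l.takeWhile p := by
  induction l with
  | nil => simp
  | cons x xs ih =>
      by_cases hx : p x <;> simp [List.takeWhile_cons, hx, ih]

theorem pvMain (lines : List String) (header : String) (i : Nat) :
    pvACnt lines header i = pvAltGo header 0 (lines.drop i) := by
  fun_induction pvFindSec lines header i with
  | case1 i h hh =>
      -- header found at index i
      rw [List.drop_eq_getElem_cons h]
      have hsec : pvFindSec lines header i = some (i, pvWhileBlank lines (i+1), pvWhileNonBlank lines (pvWhileBlank lines (i+1))) := by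
        rw [pvFindSec]; simp [h, hh]
      set rest := lines.drop (i+1) with hrest
      have hb0 : pvWhileBlank lines (i+1) = (i+1) + (rest.takeWhile pvBlank).length :=
        pvWhileBlank_eq lines (i+1)
      have hdropb0 : lines.drop (pvWhileBlank lines (i+1)) = rest.dropWhile pvBlank := by
        rw [hb0, ← List.drop_drop, ← hrest, pv_drop_takeWhile]
      have hb1 : pvWhileNonBlank lines (pvWhileBlank lines (i+1))
          = pvWhileBlank lines (i+1) + ((rest.dropWhile pvBlank).takeWhile (fun s => !pvBlank s)).length := by
        rw [pvWhileNonBlank_eq, hdropb0]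
      have hslice : PySem.List.slice lines (some ((pvWhileBlank lines (i+1) : Nat) : Int))
            (some ((pvWhileNonBlank lines (pvWhileBlank lines (i+1)) : Nat) : Int))
          = (rest.dropWhile pvBlank).takeWhile (fun s => !pvBlank s) := by
        rw [hb1]
        push_cast
        rw [PySem.List.slice_natCast_add, hdropb0, pv_take_takeWhile]
      unfold pvACnt
      rw [hsec]
      simp only [hslice]
      rw [pvFoldCount (fun ln => PySem.Str.strip ln ≠ "" ∧ pvFirstTokDigit (PySem.Str.strip ln))]
      rw [pvAltGo, if_pos hh, pvAltGo_one, pvAltGo_two]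
      rw [List.countP_congr]
      · ring
      · intro x hx
        have hnb := List.mem_takeWhile_imp hx
        simp only [pvBlank, Bool.not_eq_true', beq_eq_false_iff_ne, ne_eq] at hnb
        simp [hnb]
  | case2 i h hh ih =>
      have : pvFindSec lines header i = pvFindSec lines header (i+1) := by
        rw [pvFindSec]; simp [h, hh]
      rw [List.drop_eq_getElem_cons h, pvAltGo, if_neg hh]
      unfold pvACnt
      rw [this]
      exact ih
  | case3 i h =>
      have hd : lines.drop i = [] := List.drop_eq_nil_of_le (by omega)
      unfold pvACnt
      rw [pvFindSec]
      simp [h, hd, pvAltGo]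

-- ===== VERDICT (by name: the statement is the Claim_ definition above) =====
theorem count_numeric_lines_spec : Claim_equal_count_numeric_lines := by
  intro lines header _
  unfold Spec_count_numeric_lines count_numeric_lines_alt
  rw [pvACnt_zero, pvMain]
  simp
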